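-- pv_equiv track=rewrite | github.com/Bartaten/Testing | app/utils/merge.py | infer_key_columns
-- ===== SOURCE A (Python) =====
-- from typing import Any, Dict, Iterable, List, Optional, Sequence, Tuple
--
-- def infer_key_columns(frames: Iterable[List[Dict[str, Any]]], key_options: List[List[str]]) -> Optional[List[str]]:
--     frames_list = list(frames)
--     for keys in key_options:
--         ok = True
--         for frame in frames_list:
--             cols = set()
--             for rec in frame:
--                 cols.update(rec.keys())
--             if not all(k in cols for k in keys):
--                 ok = False
--                 break
--         if ok:
--             return keys
--     return None
-- ===== SOURCE B (Python) =====
-- def infer_key_columns(frames, key_options):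
--     frames_list = list(frames)
--     if not frames_list:
--         return key_options[0] if key_options else None
--     common = {k for rec in frames_list[0] for k in rec}
--     for frame in frames_list[1:]:
--         common &= {k for rec in frame for k in rec}
--     for keys in key_options:
--         if all(k in common for k in keys):
--             return keys
--     return None
-- ===== Notes on version B (the rewrite author's own statement) =====
-- stated objective: alternative
-- what changed: B computes each frame's column set once and intersects them into a single `common` set, then scans key_options with a flat subset test, instead of A's nested rebuild of every frame's column set for every key option.
import Mathlib
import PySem

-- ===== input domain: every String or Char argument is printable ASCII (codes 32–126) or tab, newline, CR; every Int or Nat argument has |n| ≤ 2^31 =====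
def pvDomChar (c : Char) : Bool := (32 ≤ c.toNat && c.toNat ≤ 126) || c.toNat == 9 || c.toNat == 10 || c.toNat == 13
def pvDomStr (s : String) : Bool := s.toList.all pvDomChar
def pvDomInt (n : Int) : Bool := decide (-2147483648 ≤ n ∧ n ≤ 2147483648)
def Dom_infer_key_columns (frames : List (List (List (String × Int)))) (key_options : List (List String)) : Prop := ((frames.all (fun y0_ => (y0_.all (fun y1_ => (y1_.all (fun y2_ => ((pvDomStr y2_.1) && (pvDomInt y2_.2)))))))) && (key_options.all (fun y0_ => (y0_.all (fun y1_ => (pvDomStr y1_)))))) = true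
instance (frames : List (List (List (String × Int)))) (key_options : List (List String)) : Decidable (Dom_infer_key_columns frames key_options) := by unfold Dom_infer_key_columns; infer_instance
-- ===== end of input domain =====

-- B builds each frame's column set once and intersects them into one `common` set, then
-- does a flat subset scan over key_options, instead of A's rebuild of every frame's
-- column set for every key option (objective: alternative decomposition).

-- ===== PORT A =====
-- cols = set(); for rec in frame: cols.update(rec.keys())
def pvColsA (frame : List (List (String × Int))) : PySem.Set String :=
  frame.foldl (fun cols rec => PySem.Set.update cols ((rec.map Prod.fst))) PySem.Set.empty

-- the outer 'for keys in key_options' loop with its early return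
def pvGoA (frames : List (List (List (String × Int)))) : List (List String) → Option (List String)
  | [] => none
  | keys :: rest =>
    if frames.all (fun frame => keys.all (fun k => PySem.Set.contains (pvColsA frame) k)) then
      some keys
    else pvGoA frames rest

def infer_key_columns (frames : List (List (List (String × Int)))) (key_options : List (List String)) : Option (List String) :=
  pvGoA frames key_options

-- ===== PORT B =====
-- {k for rec in frame for k in rec}
def pvColsB (frame : List (List (String × Int))) : PySem.Set String :=
  PySem.Set.ofList (frame.flatMap (fun rec => rec.map Prod.fst))

def infer_key_columns_alt (frames : List (List (List (String × Int)))) (key_options : List (List String)) : Option (List String) :=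
  match frames with
  | [] => key_options.head?
  | f :: fs =>
    let common := fs.foldl (fun c frame => PySem.Set.inter c (pvColsB frame)) (pvColsB f)
    key_options.find? (fun keys => keys.all (fun k => PySem.Set.contains common k))

-- ===== PRECONDITION & SPEC =====
def Spec_infer_key_columns (frames : List (List (List (String × Int)))) (key_options : List (List String)) (out : Option (List String)) : Prop := out = infer_key_columns_alt frames key_options
instance (frames : List (List (List (String × Int)))) (key_options : List (List String)) (out : Option (List String)) : Decidable (Spec_infer_key_columns frames key_options out) := by unfold Spec_infer_key_columns; infer_instance

-- ===== CLAIM (what is proved, stated in full; the proofs are below) =====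
def Claim_equal_infer_key_columns : Prop := ∀ (frames : List (List (List (String × Int)))) (key_options : List (List String)), Dom_infer_key_columns frames key_options → Spec_infer_key_columns frames key_options (infer_key_columns frames key_options)

-- ===== LEMMAS AND PROOFS =====

-- membership in A's column set of a frame
theorem mem_pvColsA (frame : List (List (String × Int))) (k : String) :
    k ∈ pvColsA frame ↔ ∃ rec ∈ frame, k ∈ (rec.map Prod.fst) := by
  unfold pvColsA
  induction frame using List.reverseRecOn with
  | nil => simp [PySem.Set.empty]
  | append_singleton fs f ih =>
    simp [List.foldl_append, PySem.Set.mem_update, ih]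
    aesop

-- membership in B's column set of a frame, and agreement with A's
theorem mem_pvColsB (frame : List (List (String × Int))) (k : String) :
    k ∈ pvColsB frame ↔ ∃ rec ∈ frame, k ∈ (rec.map Prod.fst) := by
  unfold pvColsB
  simp [PySem.Set.mem_ofList, List.mem_flatMap]

-- membership in B's intersected `common` set
theorem mem_common (fs : List (List (List (String × Int)))) (c : PySem.Set String) (k : String) :
    k ∈ fs.foldl (fun c frame => PySem.Set.inter c (pvColsB frame)) c ↔
      k ∈ c ∧ ∀ frame ∈ fs, k ∈ pvColsB frame := by
  induction fs generalizing c with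
  | nil => simp
  | cons f fs ih =>
    simp [List.foldl_cons, ih, PySem.Set.mem_inter]
    tauto

-- A's per-option test equals B's subset-of-common test (frames = f :: fs)
theorem test_eq (f : List (List (String × Int))) (fs : List (List (List (String × Int)))) (keys : List String) :
    ((f :: fs).all (fun frame => keys.all (fun k => PySem.Set.contains (pvColsA frame) k)))
      = keys.all (fun k => PySem.Set.contains
          (fs.foldl (fun c frame => PySem.Set.inter c (pvColsB frame)) (pvColsB f)) k) := by
  rw [Bool.eq_iff_iff]
  simp only [List.all_eq_true, PySem.Set.contains_iff, mem_common,
    mem_pvColsA, mem_pvColsB]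
  constructor
  · intro h k hk
    exact ⟨(h f (by simp)) k hk, fun fr hfr => (h fr (by simp [hfr])) k hk⟩
  · intro h fr hfr k hk
    rcases List.mem_cons.mp hfr with rfl | hfr
    · exact (h k hk).1
    · exact (h k hk).2 fr hfr

-- on empty frames A's loop returns the first key option
theorem goA_nil (ko : List (List String)) : pvGoA [] ko = ko.head? := by
  cases ko with
  | nil => rfl
  | cons keys rest => simp [pvGoA]

-- A's loop is find? of the common test when frames is nonempty
theorem goA_cons (f : List (List (String × Int))) (fs : List (List (List (String × Int)))) (ko : List (List String)) :
    pvGoA (f :: fs) ko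
      = ko.find? (fun keys => keys.all (fun k => PySem.Set.contains
          (fs.foldl (fun c frame => PySem.Set.inter c (pvColsB frame)) (pvColsB f)) k)) := by
  induction ko with
  | nil => rfl
  | cons keys rest ih =>
    rw [pvGoA, test_eq]
    by_cases h : (keys.all fun k => PySem.Set.contains (List.foldl (fun c frame => PySem.Set.inter c (pvColsB frame)) (pvColsB f) fs) k) = true
    · rw [if_pos h, List.find?_cons_of_pos (p := fun (ks : List String) => ks.all fun k => PySem.Set.contains (List.foldl (fun c frame => PySem.Set.inter c (pvColsB frame)) (pvColsB f) fs) k) (h := h)]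
    · rw [if_neg h, List.find?_cons_of_neg (p := fun (ks : List String) => ks.all fun k => PySem.Set.contains (List.foldl (fun c frame => PySem.Set.inter c (pvColsB frame)) (pvColsB f) fs) k) (h := by simpa using h), ih]

-- ===== VERDICT (by name: the statement is the Claim_ definition above) =====
theorem infer_key_columns_spec : Claim_equal_infer_key_columns := by
  intro frames key_options _
  show infer_key_columns frames key_options = infer_key_columns_alt frames key_options
  cases frames with
  | nil => simp [infer_key_columns, infer_key_columns_alt, goA_nil]
  | cons f fs => simp [infer_key_columns, infer_key_columns_alt, goA_cons]
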